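-- pv_equiv track=rewrite | github.com/KolapoAkinwumi/twitter-data | TwitterData.py | get_tags_by_month_for_users
-- ===== SOURCE A (Python) =====
-- def get_tags_by_month_for_users(tweet_info_list,usernames):
--     '''
--     Create a list of hashtags for users organized by month.
--     tweet_info_list: list of tweets being examined.
--     usernames: the owners of the tweets.
--     returns a list of hashtags tweeted by users, organized by month(tag_month_list).
--     '''
--     #create an empty dictionary.
--     tag_month_dict = {}
--     #create an empty list.
--     tag_month_list = []
--     #iterate through the list of tweets.
--     for tweet in tweet_info_list:
--         username = tweet[0]
--         month = tweet[1]
--         #if the a username is in the list of usernames,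
--         if username in usernames:
--             #but the month is not in the dictionary of hashtags and months,
--             if month not in tag_month_dict:
--                 #update the dictionary and make an empty set for every month.
--                 tag_month_dict[month] = set()
--             hashtags = tweet[2]
--             #update the dictionary with the hashtags for the corresponding month.
--             tag_month_dict[month].update(hashtags)
--         #iterate through the months in a year
--     for month in range(1,13):
--         #if a month is in the dictionary,
--         if month in tag_month_dict:
--             #append a tuple containing the month number and the month to the list
--             tup = (month,tag_month_dict[month])
--             tag_month_list.append(tup)
--         else:
--             #if a month isn't in a dictionary,
--             tup = (month,set())
--             #append a tuple containing the month number and an empty set to the list.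
--             tag_month_list.append(tup)
--     #return the list.
--     return tag_month_list
-- ===== SOURCE B (Python) =====
-- def get_tags_by_month_for_users(tweet_info_list, usernames):
--     '''Repeated-scan version: for each month 1..12, scan all tweets and collect tags.'''
--     result = []
--     for month in range(1, 13):
--         tags = set()
--         for tweet in tweet_info_list:
--             if tweet[0] in usernames and tweet[1] == month:
--                 tags.update(tweet[2])
--         result.append((month, tags))
--     return result
-- ===== Notes on version B (the rewrite author's own statement) =====
-- stated objective: alternative
-- what changed: Replaces A's build-a-dict-index-then-iterate-months strategy with a direct per-month repeated scan: no dictionary at all, an outer loop over months 1..12 with a fresh set filled by filtering the tweet list.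
import Mathlib
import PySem

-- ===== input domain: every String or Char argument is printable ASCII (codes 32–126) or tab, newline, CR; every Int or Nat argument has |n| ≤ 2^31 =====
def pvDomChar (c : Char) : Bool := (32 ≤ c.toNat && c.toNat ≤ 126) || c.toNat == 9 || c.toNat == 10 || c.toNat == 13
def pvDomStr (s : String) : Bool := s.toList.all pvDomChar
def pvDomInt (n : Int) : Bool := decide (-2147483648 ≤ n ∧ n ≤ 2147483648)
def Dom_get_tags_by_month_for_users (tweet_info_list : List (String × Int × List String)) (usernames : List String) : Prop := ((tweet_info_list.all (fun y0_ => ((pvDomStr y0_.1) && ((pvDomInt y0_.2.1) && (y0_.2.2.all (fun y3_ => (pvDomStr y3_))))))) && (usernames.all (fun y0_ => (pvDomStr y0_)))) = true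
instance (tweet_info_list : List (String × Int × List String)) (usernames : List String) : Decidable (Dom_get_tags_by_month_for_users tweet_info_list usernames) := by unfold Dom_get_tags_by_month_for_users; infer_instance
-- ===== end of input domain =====

-- ===== PORT A =====
-- B replaces A's dict index with a direct per-month repeated scan over the tweet list (alternative decomposition, same results).
def get_tags_by_month_for_users (tweet_info_list : List (String × Int × List String)) (usernames : List String) : List (Int × List String) :=
  let tag_month_dict : PySem.Dict Int (PySem.Set String) :=
    tweet_info_list.foldl (fun d tweet =>
      let username := tweet.1
      let month := tweet.2.1
      if username ∈ usernames then
        let d := if ¬ d.contains month then d.insert month PySem.Set.empty else d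
        let hashtags := tweet.2.2
        d.insert month (PySem.Set.update (d.getD month PySem.Set.empty) hashtags)
      else d) PySem.Dict.empty
  (PySem.List.pyRange 1 13 1).foldl (fun tag_month_list month =>
    if tag_month_dict.contains month then
      tag_month_list ++ [(month, tag_month_dict.getD month PySem.Set.empty)]
    else
      tag_month_list ++ [(month, PySem.Set.empty)]) []

-- ===== PORT B =====
def get_tags_by_month_for_users_alt (tweet_info_list : List (String × Int × List String)) (usernames : List String) : List (Int × List String) :=
  (PySem.List.pyRange 1 13 1).foldl (fun result month =>
    let tags := tweet_info_list.foldl (fun tags tweet =>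
      if tweet.1 ∈ usernames ∧ tweet.2.1 = month then PySem.Set.update tags tweet.2.2 else tags)
      PySem.Set.empty
    result ++ [(month, tags)]) []

-- ===== PRECONDITION & SPEC =====
def Spec_get_tags_by_month_for_users (tweet_info_list : List (String × Int × List String)) (usernames : List String) (out : List (Int × List String)) : Prop := out = get_tags_by_month_for_users_alt tweet_info_list usernames
instance (tweet_info_list : List (String × Int × List String)) (usernames : List String) (out : List (Int × List String)) : Decidable (Spec_get_tags_by_month_for_users tweet_info_list usernames out) := by unfold Spec_get_tags_by_month_for_users; infer_instance

-- ===== CLAIM (what is proved, stated in full; the proofs are below) =====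
def Claim_equal_get_tags_by_month_for_users : Prop := ∀ (tweet_info_list : List (String × Int × List String)) (usernames : List String), Dom_get_tags_by_month_for_users tweet_info_list usernames → Spec_get_tags_by_month_for_users tweet_info_list usernames (get_tags_by_month_for_users tweet_info_list usernames)

-- ===== LEMMAS AND PROOFS =====
-- A's dict after the first loop, looked up at any month m, equals B's per-month fold.
theorem pv_getD_fold (usernames : List String) (tweets : List (String × Int × List String))
    (d : PySem.Dict Int (PySem.Set String)) (m : Int) :
    (tweets.foldl (fun d tweet =>
      let username := tweet.1
      let month := tweet.2.1
      if username ∈ usernames then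
        let d := if ¬ d.contains month then d.insert month PySem.Set.empty else d
        let hashtags := tweet.2.2
        d.insert month (PySem.Set.update (d.getD month PySem.Set.empty) hashtags)
      else d) d).getD m PySem.Set.empty
    = tweets.foldl (fun tags tweet =>
        if tweet.1 ∈ usernames ∧ tweet.2.1 = m then PySem.Set.update tags tweet.2.2 else tags)
        (d.getD m PySem.Set.empty) := by
  induction tweets generalizing d with
  | nil => rfl
  | cons tw rest ih =>
    simp only [List.foldl_cons]
    rw [ih]
    by_cases hu : tw.1 ∈ usernames
    · by_cases hm : tw.2.1 = m
      · subst hm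
        cases hc : d.contains tw.2.1 with
        | true => simp [hu]
        | false =>
          have h0 : d.getD tw.2.1 ([] : PySem.Set String) = ([] : PySem.Set String) := by
            apply PySem.Dict.getD_of_not_contains; exact hc
          simp [hu, h0]
      · have hm2 : m ≠ tw.2.1 := fun h => hm h.symm
        cases hc : d.contains tw.2.1 with
        | true => simp [hu, PySem.Dict.getD_insert, hm, hm2]
        | false => simp [hu, PySem.Dict.getD_insert, hm, hm2]
    · simp [hu]

-- The month loop of A (dict lookup per month) rewritten against any function agreeing with the dict.
theorem pv_fold_congr (D : PySem.Dict Int (PySem.Set String)) (f : Int → PySem.Set String)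
    (h : ∀ m, D.getD m PySem.Set.empty = f m) (l : List Int) (acc : List (Int × PySem.Set String)) :
    l.foldl (fun acc m => if D.contains m then acc ++ [(m, D.getD m PySem.Set.empty)]
      else acc ++ [(m, PySem.Set.empty)]) acc
    = l.foldl (fun acc m => acc ++ [(m, f m)]) acc := by
  induction l generalizing acc with
  | nil => rfl
  | cons x xs ih =>
    simp only [List.foldl_cons]
    have hx : (if D.contains x then acc ++ [(x, D.getD x PySem.Set.empty)]
        else acc ++ [(x, PySem.Set.empty)]) = acc ++ [(x, f x)] := by
      by_cases hc : D.contains x = true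
      · simp only [hc, if_true]
        rw [h x]
      · have h0 : D.getD x PySem.Set.empty = PySem.Set.empty := by
          apply PySem.Dict.getD_of_not_contains
          simpa using hc
        simp only [hc, if_false, Bool.false_eq_true]
        rw [← h x, h0]
    rw [hx, ih]

-- ===== VERDICT (by name: the statement is the Claim_ definition above) =====
theorem get_tags_by_month_for_users_spec : Claim_equal_get_tags_by_month_for_users := by
  intro tweet_info_list usernames _
  show get_tags_by_month_for_users tweet_info_list usernames
      = get_tags_by_month_for_users_alt tweet_info_list usernames
  unfold get_tags_by_month_for_users get_tags_by_month_for_users_alt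
  exact pv_fold_congr _ _
    (fun m => by rw [pv_getD_fold]; simp [PySem.Dict.getD_empty]) _ []
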